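-- pv_equiv track=rewrite | github.com/benwalt/coLie | lieBasis.py | bracketChibrikov
-- ===== SOURCE A (Python) =====
-- def bracketChibrikov(word):
--     if len(word) == 1:
--         return word[0]
--
--     newWord = []
--
--     end , i = len(word)-1 , len(word)-2
--
--     while i>=0:
--         bracket = [word[end], ']']
--
--         while word[i] != word[0]:
--             bracket.insert(0,']')
--             bracket.insert(0,word[i])
--             i -= 1
--
--         bracket.insert(0,word[i])
--
--         while end > i:
--             bracket.insert(0,'[')
--             end -= 1
--
--         i -= 1
--         while i >= 0 and word[i] == word[0]:
--             bracket.insert(0,word[i])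
--             bracket.insert(0,'[')
--             bracket.append(']')
--             i -= 1
--
--         newWord.insert(0,''.join(bracket))
--
--         end = i
--         i -= 1
--
--     return bracketChibrikov(newWord)
-- ===== SOURCE B (Python) =====
-- def bracketChibrikov(word):
--     # Iteratively reduce the word level by level until one expression remains.
--     # Each level is split into blocks from the right: a block is an anchor
--     # occurrence of the first letter, the non-anchor letters after it, and the
--     # block's closing letter; any anchor run before it wraps the whole block.
--     while len(word) > 1:
--         a = word[0]
--         groups = []
--         end = len(word) - 1
--         while end >= 0:
--             p = end - 1
--             while word[p] != a:        # anchor occurrence below the closing letter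
--                 p -= 1
--             core = ('[' * (end - p) + a
--                     + ''.join(x + ']' for x in word[p + 1:end])
--                     + word[end] + ']')
--             s = p
--             while s > 0 and word[s - 1] == a:   # anchor run wrapping the block
--                 s -= 1
--             k = p - s
--             groups.append(('[' + a) * k + core + ']' * k)
--             end = s - 1
--         groups.reverse()
--         word = groups
--     return word[0]
-- ===== Notes on version B (the rewrite author's own statement) =====
-- stated objective: alternative
-- what changed: A's tail recursion that assembles each bracket by repeated insert(0,...) inside interleaved descending scans is replaced by an iterative fixpoint loop whose levels split the word into blocks from the right and build each bracket in closed form (string repetition, slice + join), appending groups and reversing once; Pre_ excludes only the empty list, on which A recurses forever (RecursionError) and B raises IndexError.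
import Mathlib
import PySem

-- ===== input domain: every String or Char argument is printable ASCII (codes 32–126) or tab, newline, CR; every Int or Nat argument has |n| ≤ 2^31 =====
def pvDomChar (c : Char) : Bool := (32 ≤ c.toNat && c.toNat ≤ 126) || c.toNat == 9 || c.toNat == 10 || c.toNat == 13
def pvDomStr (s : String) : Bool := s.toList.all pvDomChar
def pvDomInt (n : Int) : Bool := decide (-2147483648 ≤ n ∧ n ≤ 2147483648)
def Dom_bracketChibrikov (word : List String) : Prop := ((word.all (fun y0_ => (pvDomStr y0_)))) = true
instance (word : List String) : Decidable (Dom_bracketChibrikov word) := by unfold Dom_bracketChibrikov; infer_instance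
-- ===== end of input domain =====

-- B replaces A's tail recursion (which assembles each bracket by repeated insert(0,·) inside
-- interleaved descending scans) by an iterative fixpoint loop whose levels split the word into
-- blocks from the right and build each bracket in closed form (objective: alternative).

-- ===== PORT A =====
-- word[i] : every read A performs on an admitted input is in range (the proofs below only ever
-- evaluate these reads in range), so the `.getD ""` padding is never the value Python sees.
def pvGetA (w : List String) (i : Int) : String := (PySem.List.pyGet? w i).getD ""

-- while word[i] != word[0]: bracket.insert(0,']'); bracket.insert(0,word[i]); i -= 1
-- (fuel is a totality guard only; the fuel-0 result equals the loop's exit result)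
def pvScanA (w : List String) : Nat → Int → List String → Int × List String
  | 0, i, b => (i, b)
  | f+1, i, b =>
    if pvGetA w i ≠ pvGetA w 0 then pvScanA w f (i-1) (pvGetA w i :: "]" :: b) else (i, b)

-- while end > i: bracket.insert(0,'['); end -= 1
def pvOpenA : Nat → Int → Int → List String → List String
  | 0, _, _, b => b
  | f+1, e, i, b => if i < e then pvOpenA f (e-1) i ("[" :: b) else b

-- while i >= 0 and word[i] == word[0]: bracket.insert(0,word[i]); bracket.insert(0,'['); bracket.append(']'); i -= 1
def pvWrapA (w : List String) : Nat → Int → List String → Int × List String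
  | 0, i, b => (i, b)
  | f+1, i, b =>
    if 0 ≤ i ∧ pvGetA w i = pvGetA w 0 then
      pvWrapA w f (i-1) ("[" :: pvGetA w i :: b ++ ["]"])
    else (i, b)

-- the outer `while i>=0` loop; newWord.insert(0, ''.join(bracket)) prepends the joined group
def pvOuterA (w : List String) : Nat → Int → Int → List String → List String
  | 0, _, _, nw => nw
  | f+1, e, i, nw =>
    if 0 ≤ i then
      let r1 := pvScanA w (i.toNat + 1) i [pvGetA w e, "]"]
      let b3 := pvOpenA (e - r1.1).toNat e r1.1 (pvGetA w r1.1 :: r1.2)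
      let r2 := pvWrapA w ((r1.1 - 1).toNat + 1) (r1.1 - 1) b3
      pvOuterA w f r2.1 (r2.1 - 1) (PySem.Str.join "" r2.2 :: nw)
    else nw

-- one recursion level: the body of bracketChibrikov for len(word) != 1
def pvStepA (w : List String) : List String :=
  pvOuterA w w.length ((w.length : Int) - 1) ((w.length : Int) - 2) []

-- the tail recursion `return bracketChibrikov(newWord)`; fuel w.length suffices since every
-- level strictly shrinks the word (pure totality guard, never hit inside Pre_)
def pvGoA : Nat → List String → String
  | 0, w => pvGetA w 0
  | f+1, w => if w.length = 1 then pvGetA w 0 else pvGoA f (pvStepA w)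

def bracketChibrikov (word : List String) : String := pvGoA word.length word

-- ===== PORT B =====
def pvGetB (w : List String) (i : Int) : String := (PySem.List.pyGet? w i).getD ""

-- p = end - 1; while word[p] != a: p -= 1   (fuel is a totality guard only)
def pvFindPB (w : List String) (a : String) : Nat → Int → Int
  | 0, p => p
  | f+1, p => if pvGetB w p ≠ a then pvFindPB w a f (p-1) else p

-- s = p; while s > 0 and word[s-1] == a: s -= 1
def pvRunStartB (w : List String) (a : String) : Nat → Int → Int
  | 0, s => s
  | f+1, s => if 0 < s ∧ pvGetB w (s-1) = a then pvRunStartB w a f (s-1) else s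

-- Python `s * k` for a string s (every repeat count B uses is ≥ 0)
def pvRepB (s : String) : Nat → String
  | 0 => ""
  | k+1 => s ++ pvRepB s k

-- ('['+a)*k + ('['*(end-p) + a + ''.join(x+']' for x in word[p+1:end]) + word[end] + ']') + ']'*k
def pvGroupB (w : List String) (a : String) (e p s : Int) : String :=
  let k := (p - s).toNat
  pvRepB ("[" ++ a) k ++
    (pvRepB "[" (e - p).toNat ++ a ++
      PySem.Str.join "" ((PySem.List.slice w (some (p + 1)) (some e)).map (· ++ "]")) ++
      pvGetB w e ++ "]") ++
    pvRepB "]" k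

-- the inner `while end >= 0` loop of one level, appending each block's bracket to `groups`
def pvLevelB (w : List String) (a : String) : Nat → Int → List String → List String
  | 0, _, gs => gs
  | f+1, e, gs =>
    if 0 ≤ e then
      let p := pvFindPB w a (e.toNat + 1) (e - 1)
      let s := pvRunStartB w a (p.toNat + 1) p
      pvLevelB w a f (s - 1) (gs ++ [pvGroupB w a e p s])
    else gs

-- one level: collect the blocks right-to-left, then groups.reverse()
def pvStepB (w : List String) : List String :=
  (pvLevelB w (pvGetB w 0) w.length ((w.length : Int) - 1) []).reverse

-- while len(word) > 1: word = <one level>; fuel w.length is a totality guard only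
def pvGoB : Nat → List String → String
  | 0, w => pvGetB w 0
  | f+1, w => if 1 < w.length then pvGoB f (pvStepB w) else pvGetB w 0

def bracketChibrikov_alt (word : List String) : String := pvGoB word.length word

-- ===== PRECONDITION & SPEC =====
-- Pre_ excludes only the empty list, on which Python A recurses forever (RecursionError)
-- and Python B raises IndexError.
def Pre_bracketChibrikov (word : List String) : Prop := word ≠ []
instance (word : List String) : Decidable (Pre_bracketChibrikov word) := by
  unfold Pre_bracketChibrikov; infer_instance

def pvWitness_bracketChibrikov : List String := ["a", "b", "a"]

def Spec_bracketChibrikov (word : List String) (out : String) : Prop := out = bracketChibrikov_alt word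
instance (word : List String) (out : String) : Decidable (Spec_bracketChibrikov word out) := by
  unfold Spec_bracketChibrikov; infer_instance

-- ===== CLAIM (what is proved, stated in full; the proofs are below) =====
def Claim_equal_bracketChibrikov : Prop := ∀ (word : List String), Dom_bracketChibrikov word → Pre_bracketChibrikov word → Spec_bracketChibrikov word (bracketChibrikov word)

-- ===== LEMMAS AND PROOFS =====

theorem pv_str_ext {s t : String} (h : s.toList = t.toList) : s = t := String.toList_inj.mp h

-- Nat-indexed in-range read, the common language of the lemmas below
def pvGetN (w : List String) (t : Nat) : String := (PySem.List.pyGet? w (t : Int)).getD ""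

theorem pv_getA_getN (w : List String) (t : Nat) : pvGetA w (t : Int) = pvGetN w t := rfl

theorem pv_getB_getN (w : List String) (t : Nat) : pvGetB w (t : Int) = pvGetN w t := rfl

theorem pv_getA_zero (w : List String) : pvGetA w 0 = pvGetN w 0 := rfl

theorem pv_getN_lt (w : List String) (t : Nat) (h : t < w.length) : pvGetN w t = w[t] := by
  simp [pvGetN, PySem.List.pyGet?_natCast, List.getElem?_eq_getElem h]

-- ---- string join algebra ----
theorem pv_charsJoinNilCons (c : List Char) (l : List (List Char)) :
    PySem.Chars.join [] (c :: l) = c ++ PySem.Chars.join [] l := by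
  cases l with
  | nil => simp [PySem.Chars.join_singleton, PySem.Chars.join_nil]
  | cons d m => rw [PySem.Chars.join_cons_cons]; simp

theorem pv_join_nil : PySem.Str.join "" ([] : List String) = "" := by
  simp [PySem.Str.join, PySem.Chars.join_nil]

theorem pv_join_cons (x : String) (l : List String) :
    PySem.Str.join "" (x :: l) = x ++ PySem.Str.join "" l := by
  simp [PySem.Str.join, pv_charsJoinNilCons]

theorem pv_join_append (l1 l2 : List String) :
    PySem.Str.join "" (l1 ++ l2) = PySem.Str.join "" l1 ++ PySem.Str.join "" l2 := by
  induction l1 with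
  | nil => simp [pv_join_nil]
  | cons x l ih =>
    rw [List.cons_append, pv_join_cons, pv_join_cons, ih]
    apply pv_str_ext; simp

theorem pv_join_replicate (s : String) (k : Nat) :
    PySem.Str.join "" (List.replicate k s) = pvRepB s k := by
  induction k with
  | zero => simp [pv_join_nil, pvRepB]
  | succ k ih => simp [List.replicate_succ, pv_join_cons, ih, pvRepB]

theorem pv_join_flatMap (xs : List String) :
    PySem.Str.join "" (xs.flatMap (fun x => [x, "]"])) =
      PySem.Str.join "" (xs.map (· ++ "]")) := by
  induction xs with
  | nil => simp
  | cons x l ih =>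
    rw [List.flatMap_cons, List.map_cons, pv_join_append, pv_join_cons, pv_join_cons, pv_join_nil,
      pv_join_cons, ih]
    apply pv_str_ext; simp

-- ---- findP / findQ : the indices A's descending scans stop at ----
def pvFindP (w : List String) : Nat → Nat
  | 0 => 0
  | t+1 => if pvGetN w (t+1) = pvGetN w 0 then t+1 else pvFindP w t

def pvFindQ (w : List String) : Nat → Int
  | 0 => -1
  | t+1 => if pvGetN w (t+1) ≠ pvGetN w 0 then ((t+1 : Nat) : Int) else pvFindQ w t

theorem pvFindP_le (w : List String) (t : Nat) : pvFindP w t ≤ t := by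
  induction t with
  | zero => simp [pvFindP]
  | succ t ih => unfold pvFindP; split <;> omega

theorem pvFindP_mem (w : List String) (t : Nat) : pvGetN w (pvFindP w t) = pvGetN w 0 := by
  induction t with
  | zero => simp [pvFindP]
  | succ t ih => unfold pvFindP; split <;> simp_all

theorem pvFindQ_lb (w : List String) (t : Nat) : -1 ≤ pvFindQ w t := by
  induction t with
  | zero => simp [pvFindQ]
  | succ t ih => unfold pvFindQ; split <;> push_cast <;> omega

theorem pvFindQ_le (w : List String) (t : Nat) : pvFindQ w t ≤ (t : Int) := by
  induction t with
  | zero => simp [pvFindQ]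
  | succ t ih => unfold pvFindQ; split <;> push_cast <;> omega

theorem pvFindQ_mem (w : List String) (t : Nat) (h : 0 ≤ pvFindQ w t) :
    pvGetN w (pvFindQ w t).toNat ≠ pvGetN w 0 := by
  induction t with
  | zero => simp [pvFindQ] at h
  | succ t ih =>
    unfold pvFindQ at h ⊢
    by_cases hc : pvGetN w (t+1) ≠ pvGetN w 0
    · rw [if_pos hc]; simpa using hc
    · rw [if_neg hc] at h ⊢; exact ih h

-- ---- characterizations of A's inner loops ----
def pvMid (w : List String) (t : Nat) : List String :=
  ((w.drop (pvFindP w t + 1)).take (t - pvFindP w t)).flatMap (fun x => [x, "]"])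

theorem pvMid_succ (w : List String) (t : Nat) (ht : t + 1 < w.length)
    (hc : pvGetN w (t+1) ≠ pvGetN w 0) :
    pvFindP w (t+1) = pvFindP w t ∧ pvMid w (t+1) = pvMid w t ++ [pvGetN w (t+1), "]"] := by
  have hP : pvFindP w (t+1) = pvFindP w t := by
    conv_lhs => rw [pvFindP]
    rw [if_neg hc]
  refine ⟨hP, ?_⟩
  unfold pvMid
  rw [hP]
  have hle := pvFindP_le w t
  set p := pvFindP w t with hp
  have h1 : t + 1 - p = (t - p) + 1 := by omega
  rw [h1, List.take_add_one]
  have h2 : (w.drop (p+1))[t - p]? = w[(p+1) + (t - p)]? := List.getElem?_drop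
  have h3 : (p+1) + (t - p) = t + 1 := by omega
  rw [h3] at h2
  rw [h2, List.getElem?_eq_getElem ht]
  rw [List.flatMap_append]
  rw [pv_getN_lt w (t+1) ht]
  simp

theorem pvScanA_char (w : List String) :
    ∀ t, t < w.length → ∀ b,
      pvScanA w (t+1) (t : Int) b = (((pvFindP w t : Nat) : Int), pvMid w t ++ b) := by
  intro t
  induction t with
  | zero =>
    intro ht b
    simp [pvScanA, pvFindP, pvMid, pvGetA]
  | succ t ih =>
    intro ht b
    rw [pvScanA]
    by_cases hc : pvGetN w (t+1) = pvGetN w 0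
    · rw [if_neg (by simpa [pv_getA_getN] using not_not_intro hc)]
      have hP : pvFindP w (t+1) = t + 1 := by unfold pvFindP; rw [if_pos hc]
      have hM : pvMid w (t+1) = [] := by unfold pvMid; rw [hP]; simp
      rw [hP, hM]; simp
    · rw [if_pos (by simpa [pv_getA_getN] using hc)]
      have harg : ((t+1 : Nat) : Int) - 1 = (t : Nat) := by push_cast; ring
      rw [harg, pv_getA_getN]
      rw [ih (by omega)]
      obtain ⟨hP, hM⟩ := pvMid_succ w t ht hc
      rw [hP, hM]
      simp

theorem pvOpenA_char (k : Nat) :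
    ∀ (i : Int) b, pvOpenA k (i + k) i b = List.replicate k "[" ++ b := by
  induction k with
  | zero => intro i b; simp [pvOpenA]
  | succ k ih =>
    intro i b
    have h : (i : Int) < i + ((k : Nat) + 1 : Nat) := by push_cast; omega
    rw [pvOpenA, if_pos h]
    have h2 : (i + ((k : Nat) + 1 : Nat) - 1 : Int) = i + (k : Nat) := by push_cast; ring
    rw [h2, ih i]
    rw [List.replicate_succ']
    simp

def pvWrapIter (a : String) : Nat → List String → List String
  | 0, b => b
  | k+1, b => "[" :: a :: pvWrapIter a k b ++ ["]"]

theorem pvWrapIter_inner (a : String) (k : Nat) (b : List String) :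
    pvWrapIter a k ("[" :: a :: b ++ ["]"]) = pvWrapIter a (k+1) b := by
  induction k generalizing b with
  | zero => rfl
  | succ k ih => simp only [pvWrapIter, ih]

theorem pv_repB_bracket (k : Nat) :
    (pvRepB "]" k).toList ++ [']'] = ']' :: (pvRepB "]" k).toList := by
  have hch : "]".toList = [']'] := by decide
  induction k with
  | zero => simp [pvRepB]
  | succ k ih => simp [pvRepB, hch, ih]

theorem pv_join_wrapIter (a : String) (k : Nat) (b : List String) :
    PySem.Str.join "" (pvWrapIter a k b) =
      pvRepB ("[" ++ a) k ++ PySem.Str.join "" b ++ pvRepB "]" k := by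
  induction k with
  | zero => simp [pvWrapIter, pvRepB]
  | succ k ih =>
    show PySem.Str.join "" (("[" :: a :: pvWrapIter a k b) ++ ["]"]) = _
    rw [pv_join_append, pv_join_cons, pv_join_cons, pv_join_cons, pv_join_nil, ih]
    apply pv_str_ext; simp [pvRepB, pv_repB_bracket]

theorem pvWrapA_char (w : List String) :
    ∀ (t : Nat) (b : List String),
      pvWrapA w (t+1) (t : Int) b =
        (pvFindQ w t, pvWrapIter (pvGetN w 0) (((t : Int) - pvFindQ w t).toNat) b) := by
  intro t
  induction t with
  | zero =>
    intro b
    rw [pvWrapA, if_pos (by constructor <;> simp [pv_getA_zero])]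
    rw [pvWrapA]
    norm_num [pvFindQ, pvWrapIter, pv_getA_zero]
  | succ t ih =>
    intro b
    rw [pvWrapA]
    by_cases hc : pvGetN w (t+1) = pvGetN w 0
    · rw [if_pos (by refine ⟨by omega, by simpa [pv_getA_getN] using hc⟩)]
      have harg : ((t+1 : Nat) : Int) - 1 = (t : Nat) := by push_cast; ring
      rw [harg, pv_getA_getN, hc, ih]
      have hQ : pvFindQ w (t+1) = pvFindQ w t := by
        conv_lhs => rw [pvFindQ]
        rw [if_neg (not_not_intro hc)]
      have hq1 := pvFindQ_lb w t
      have hq2 := pvFindQ_le w t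
      have hk : (((t+1 : Nat) : Int) - pvFindQ w (t+1)).toNat
          = (((t : Nat) : Int) - pvFindQ w t).toNat + 1 := by
        rw [hQ]; omega
      rw [hk, hQ, pvWrapIter_inner]
    · rw [if_neg (by rintro ⟨-, h2⟩; exact hc (by simpa [pv_getA_getN] using h2))]
      have hQ : pvFindQ w (t+1) = ((t+1 : Nat) : Int) := by
        unfold pvFindQ; rw [if_pos hc]
      rw [hQ]
      simp [pvWrapIter]

theorem pvOuterA_neg (w : List String) (f : Nat) (e i : Int) (nw : List String) (h : i < 0) :
    pvOuterA w f e i nw = nw := by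
  cases f with
  | zero => rfl
  | succ f => rw [pvOuterA, if_neg (by omega)]

-- ---- characterizations of B's descending scans ----
theorem pvFindPB_char (w : List String) :
    ∀ (t F : Nat), t + 1 ≤ F →
      pvFindPB w (pvGetN w 0) F ((t : Nat) : Int) = ((pvFindP w t : Nat) : Int) := by
  intro t
  induction t with
  | zero =>
    intro F hF
    obtain ⟨F', rfl⟩ : ∃ F', F = F' + 1 := ⟨F - 1, by omega⟩
    rw [pvFindPB, if_neg (by rw [pv_getB_getN]; exact not_not_intro rfl)]
    simp [pvFindP]
  | succ t ih =>
    intro F hF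
    obtain ⟨F', rfl⟩ : ∃ F', F = F' + 1 := ⟨F - 1, by omega⟩
    rw [pvFindPB]
    by_cases hc : pvGetN w (t+1) = pvGetN w 0
    · rw [if_neg (by rw [pv_getB_getN]; exact not_not_intro hc)]
      have hP : pvFindP w (t+1) = t + 1 := by unfold pvFindP; rw [if_pos hc]
      rw [hP]
    · rw [if_pos (by rw [pv_getB_getN]; exact hc)]
      have harg : ((t+1 : Nat) : Int) - 1 = (t : Nat) := by push_cast; ring
      have hP : pvFindP w (t+1) = pvFindP w t := by
        conv_lhs => rw [pvFindP]
        rw [if_neg hc]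
      rw [harg, ih F' (by omega), hP]

theorem pvRunStartB_char (w : List String) :
    ∀ (t F : Nat), t ≤ F →
      pvRunStartB w (pvGetN w 0) F ((t : Nat) : Int) = pvFindQ w (t-1) + 1 := by
  intro t
  induction t with
  | zero =>
    intro F hF
    cases F with
    | zero => simp [pvRunStartB, pvFindQ]
    | succ F =>
      rw [pvRunStartB, if_neg (by rintro ⟨h, -⟩; omega)]
      simp [pvFindQ]
  | succ t ih =>
    intro F hF
    obtain ⟨F', rfl⟩ : ∃ F', F = F' + 1 := ⟨F - 1, by omega⟩
    rw [pvRunStartB]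
    have harg : ((t+1 : Nat) : Int) - 1 = (t : Nat) := by push_cast; ring
    by_cases hc : pvGetN w t = pvGetN w 0
    · rw [if_pos ⟨by omega, by rw [harg, pv_getB_getN]; exact hc⟩]
      rw [harg, ih F' (by omega)]
      have hQ : pvFindQ w ((t+1)-1) = pvFindQ w (t-1) := by
        cases t with
        | zero => rfl
        | succ u =>
          show pvFindQ w (u+1) = pvFindQ w u
          conv_lhs => rw [pvFindQ]
          rw [if_neg (not_not_intro hc)]
      rw [hQ]
    · rw [if_neg (by rintro ⟨-, h2⟩; rw [harg, pv_getB_getN] at h2; exact hc h2)]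
      cases t with
      | zero => exact absurd rfl hc
      | succ u =>
        have hQ : pvFindQ w ((u+1+1)-1) = ((u+1 : Nat) : Int) := by
          show pvFindQ w (u+1) = _
          conv_lhs => rw [pvFindQ]
          rw [if_pos hc]
        rw [hQ]
        push_cast; ring

-- ---- B's level loop: accumulator and negative index ----
theorem pvLevelB_neg (w : List String) (a : String) (f : Nat) (e : Int) (gs : List String)
    (h : e < 0) : pvLevelB w a f e gs = gs := by
  cases f with
  | zero => rfl
  | succ f => rw [pvLevelB, if_neg (by omega)]

theorem pvLevelB_acc (w : List String) (a : String) :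
    ∀ (f : Nat) (e : Int) (gs : List String),
      pvLevelB w a f e gs = gs ++ pvLevelB w a f e [] := by
  intro f
  induction f with
  | zero => intro e gs; simp [pvLevelB]
  | succ f ih =>
    intro e gs
    rw [pvLevelB]
    conv_rhs => rw [pvLevelB]
    split
    · dsimp only
      rw [ih _ (gs ++ _), ih _ ([] ++ _)]
      simp
    · simp

-- ---- the joined bracket of one block equals B's closed-form group string ----
theorem pv_group_eq (w : List String) (p e : Nat) (q : Int)
    (hpe : p + 1 ≤ e) (hqp : q < (p : Nat))
    (hpdef : pvFindP w (e-1) = p) :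
    PySem.Str.join "" (pvWrapIter (pvGetN w 0) (((p : Int) - 1 - q).toNat)
        (List.replicate (e - p) "[" ++
          (pvGetN w 0 :: (pvMid w (e-1) ++ [pvGetN w e, "]"]))))
      = pvGroupB w (pvGetN w 0) (e : Int) (p : Int) (q + 1) := by
  unfold pvGroupB
  dsimp only
  have hk : ((p : Int) - (q + 1)).toNat = ((p : Int) - 1 - q).toNat := by omega
  have hco : ((e : Int) - (p : Int)).toNat = e - p := by omega
  have hsl : (p : Int) + 1 = ((p + 1 : Nat) : Int) := by push_cast; ring
  rw [hk, hco, hsl, PySem.List.slice_natCast]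
  rw [pv_join_wrapIter]
  rw [pv_join_append, pv_join_replicate, pv_join_cons]
  rw [pv_join_append, pv_join_cons, pv_join_cons, pv_join_nil]
  unfold pvMid
  rw [← pv_join_flatMap, hpdef]
  have htake : (e - 1) - p = e - (p + 1) := by omega
  rw [htake, pv_getB_getN]
  apply pv_str_ext; simp

-- ---- the main level correspondence: A's outer loop from end = e equals B's block loop ----
theorem pvLevel_eq (w : List String) (e : Nat) (he1 : 1 ≤ e) (he2 : e < w.length)
    (fA fB : Nat) (hfA : e + 1 ≤ fA) (hfB : e + 1 ≤ fB) (nw : List String) :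
    pvOuterA w fA (e : Int) ((e : Int) - 1) nw
      = (pvLevelB w (pvGetN w 0) fB (e : Int) []).reverse ++ nw := by
  obtain ⟨f, rfl⟩ : ∃ f, fA = f + 1 := ⟨fA - 1, by omega⟩
  obtain ⟨fb, rfl⟩ : ∃ fb, fB = fb + 1 := ⟨fB - 1, by omega⟩
  -- A: one outer iteration
  rw [pvOuterA, if_pos (by omega : (0:Int) ≤ (e : Int) - 1)]
  have hi : ((e : Int) - 1) = ((e - 1 : Nat) : Int) := by omega
  rw [hi, Int.toNat_natCast]
  rw [pvScanA_char w (e-1) (by omega)]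
  set p := pvFindP w (e-1) with hp
  have hple : p ≤ e - 1 := pvFindP_le w (e-1)
  have hP1 : pvGetN w p = pvGetN w 0 := pvFindP_mem w (e-1)
  dsimp only
  rw [pv_getA_getN w p, hP1]
  have hopen : pvOpenA ((e : Int) - (p : Int)).toNat (e : Int) (p : Int)
      (pvGetN w 0 :: (pvMid w (e-1) ++ [pvGetA w (e : Int), "]"]))
      = List.replicate (e - p) "[" ++ (pvGetN w 0 :: (pvMid w (e-1) ++ [pvGetA w (e : Int), "]"])) := by
    have h1 : ((e : Int) - (p : Int)).toNat = e - p := by omega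
    have h2 : ((e : Nat) : Int) = ((p : Nat) : Int) + ((e - p : Nat) : Int) := by omega
    rw [h1, h2, pvOpenA_char (e - p) ((p : Nat) : Int)]
  rw [hopen]
  rw [pv_getA_getN w e]
  set b3 := List.replicate (e - p) "[" ++ (pvGetN w 0 :: (pvMid w (e-1) ++ [pvGetN w e, "]"])) with hb3
  set q := pvFindQ w (p-1) with hqdef
  have hq0 : -1 ≤ q := pvFindQ_lb w (p-1)
  have hqp : q < (p : Nat) := by
    by_cases hp0 : p = 0
    · have hqv : q = -1 := by rw [hqdef, hp0]; simp [pvFindQ]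
      rw [hqv, hp0]; simp
    · have := pvFindQ_le w (p-1); omega
  -- A's wrap loop stops at q and wraps (p-1-q) times
  have hwrapeq : pvWrapA w (((p : Int) - 1).toNat + 1) ((p : Int) - 1) b3
      = (q, pvWrapIter (pvGetN w 0) (((p : Int) - 1 - q).toNat) b3) := by
    by_cases hp0 : p = 0
    · have hqv : q = -1 := by rw [hqdef, hp0]; simp [pvFindQ]
      rw [pvWrapA, if_neg (by rintro ⟨h, -⟩; omega)]
      have h1 : ((p : Int) - 1) = -1 := by omega
      rw [hqv, h1]
      norm_num [pvWrapIter]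
    · have hcast : ((p : Int) - 1) = ((p - 1 : Nat) : Int) := by omega
      have hfuel : ((p : Int) - 1).toNat + 1 = (p - 1) + 1 := by omega
      rw [hfuel, hcast, pvWrapA_char w (p-1) b3, ← hcast, hqdef]
  rw [hwrapeq]
  dsimp only
  have hpe : p + 1 ≤ e := by omega
  have hgroup := pv_group_eq w p e q hpe hqp hp.symm
  rw [← hb3] at hgroup
  -- B: one iteration of the block loop
  have hBstep : pvLevelB w (pvGetN w 0) (fb+1) (e : Int) []
      = pvGroupB w (pvGetN w 0) (e : Int) (p : Int) (q + 1)
          :: pvLevelB w (pvGetN w 0) fb q [] := by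
    rw [pvLevelB, if_pos (by omega : (0:Int) ≤ (e : Int))]
    dsimp only
    have he' : ((e : Int)).toNat + 1 = (e - 1) + 1 + 1 := by omega
    rw [he', hi, pvFindPB_char w (e-1) ((e-1)+1+1) (by omega)]
    rw [← hp, Int.toNat_natCast, pvRunStartB_char w p (p+1) (by omega), ← hqdef]
    have hs1 : q + 1 - 1 = q := by ring
    rw [hs1, List.nil_append, pvLevelB_acc]
    rfl
  rw [hBstep]
  by_cases hqneg : q ≤ 0
  · -- q = -1: last block of the level, both loops stop
    have hqm1 : q = -1 := by
      rcases lt_or_eq_of_le hqneg with h | h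
      · omega
      · exfalso
        have hmem := pvFindQ_mem w (p-1) (by omega)
        rw [← hqdef, h] at hmem
        exact hmem (by simp)
    rw [hqm1] at hgroup ⊢
    rw [pvOuterA_neg w f (-1) ((-1 : Int) - 1) _ (by omega)]
    rw [pvLevelB_neg w _ fb (-1) [] (by omega)]
    rw [hgroup]
    simp
  · -- q ≥ 1: recurse on the prefix word[0..q]
    have hq1 : 1 ≤ q := by omega
    obtain ⟨qn, hcast⟩ : ∃ qn : Nat, q = ((qn : Nat) : Int) := ⟨q.toNat, by omega⟩
    have hq1n : 1 ≤ qn := by omega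
    have hq2n : qn < w.length := by omega
    have hf1 : qn + 1 ≤ f := by omega
    have hf2 : qn + 1 ≤ fb := by omega
    have hqe : qn < e := by omega
    rw [hcast] at hgroup ⊢
    rw [pvLevel_eq w qn hq1n hq2n f fb hf1 hf2
      (PySem.Str.join "" (pvWrapIter (pvGetN w 0)
        (((p : Int) - 1 - ((qn : Nat) : Int)).toNat) b3) :: nw)]
    rw [hgroup]
    simp
termination_by e
decreasing_by omega

-- ---- level equality and the top-level iteration ----
theorem pv_step_eq (w : List String) (h2 : 2 ≤ w.length) : pvStepA w = pvStepB w := by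
  unfold pvStepA pvStepB
  have e1 : ((w.length : Int) - 1) = ((w.length - 1 : Nat) : Int) := by omega
  rw [e1]
  have e2 : ((w.length : Int) - 2) = ((w.length - 1 : Nat) : Int) - 1 := by omega
  rw [e2]
  rw [pvLevel_eq w (w.length - 1) (by omega) (by omega) w.length w.length (by omega) (by omega)]
  have hg : pvGetB w 0 = pvGetN w 0 := rfl
  rw [hg]
  simp

theorem pvGoA_nil (f : Nat) : pvGoA f [] = "" := by
  induction f with
  | zero => simp [pvGoA, pvGetA, PySem.List.pyGet?]
  | succ f ih =>
    rw [pvGoA, if_neg (by simp)]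
    have : pvStepA [] = [] := rfl
    rw [this, ih]

theorem pv_go_eq : ∀ (f : Nat) (w : List String), pvGoA f w = pvGoB f w := by
  intro f
  induction f with
  | zero => intro w; rfl
  | succ f ih =>
    intro w
    rcases Nat.lt_or_ge w.length 2 with h | h
    · interval_cases hlen : w.length
      · have : w = [] := List.eq_nil_of_length_eq_zero hlen
        subst this
        rw [pvGoB, if_neg (by simp)]
        exact (pvGoA_nil (f+1)).trans (by simp [pvGetB, PySem.List.pyGet?])
      · rw [pvGoA, if_pos hlen, pvGoB, if_neg (by omega)]
        rfl
    · rw [pvGoA, if_neg (by omega), pvGoB, if_pos (by omega)]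
      rw [ih, pv_step_eq w h]

-- ===== VERDICT (by name: the statement is the Claim_ definition above) =====
theorem bracketChibrikov_spec : Claim_equal_bracketChibrikov := by
  intro word _ _
  unfold Spec_bracketChibrikov bracketChibrikov bracketChibrikov_alt
  exact pv_go_eq word.length word
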